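-- pv_equiv track=rewrite | github.com/wael159/python_training | level_1/dishes.py | getMaximumEatenDishCount_3
-- ===== SOURCE A (Python) =====
-- from typing import List
-- from typing import List
--
-- def getMaximumEatenDishCount_3(N: int, D: List[int], K: int) -> int:
--     last_k_eaten = []     # to track the order of last K eaten dishes
--     seen = set()          # to check if dish is recently eaten in O(1)
--     count = 0
--
--     for dish in D:
--         if dish not in seen:
--             count += 1
--             last_k_eaten.append(dish)
--             seen.add(dish)
--
--             if len(last_k_eaten) > K:
--                 # Remove the oldest dish from both list and set
--                 removed = last_k_eaten.pop(0)
--                 seen.remove(removed)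
--
--     return count
-- ===== SOURCE B (Python) =====
-- from typing import List
--
-- def getMaximumEatenDishCount_3(N: int, D: List[int], K: int) -> int:
--     # last_pos[dish] = running count at the moment the dish was last eaten
--     last_pos = {}
--     count = 0
--     for dish in D:
--         p = last_pos.get(dish)
--         if p is None or count - p >= K:
--             count += 1
--             last_pos[dish] = count
--         # else: dish is among the last K eaten -> skip
--     return count
-- ===== Notes on version B (the rewrite author's own statement) =====
-- stated objective: simpler
-- what changed: Replaces the evicting FIFO window (list pop(0) + mirror set) with a single dict mapping each dish to the count-position at which it was last eaten; eligibility becomes the arithmetic test count - last_pos[dish] >= K, so the eviction branch disappears.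
import Mathlib
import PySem

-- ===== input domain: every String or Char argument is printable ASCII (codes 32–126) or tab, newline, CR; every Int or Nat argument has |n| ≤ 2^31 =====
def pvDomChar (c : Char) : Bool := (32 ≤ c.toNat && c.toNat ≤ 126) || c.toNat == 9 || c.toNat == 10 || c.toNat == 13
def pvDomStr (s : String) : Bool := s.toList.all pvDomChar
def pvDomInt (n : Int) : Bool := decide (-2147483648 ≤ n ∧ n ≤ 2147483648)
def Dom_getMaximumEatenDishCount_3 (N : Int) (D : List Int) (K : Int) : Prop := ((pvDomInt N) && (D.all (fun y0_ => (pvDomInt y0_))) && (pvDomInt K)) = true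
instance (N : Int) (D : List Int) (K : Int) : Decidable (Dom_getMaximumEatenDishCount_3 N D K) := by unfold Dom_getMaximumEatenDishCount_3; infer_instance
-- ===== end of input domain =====

-- B replaces A's evicting FIFO window (list + mirror set) with one dict of last-eaten
-- count-positions, deciding eligibility by "count - last_pos[dish] >= K" (objective: simpler).

-- ===== PORT A =====
def getMaximumEatenDishCount_3 (N : Int) (D : List Int) (K : Int) : Int :=
  (D.foldl
    (fun (st : List Int × PySem.Set Int × Int) dish =>
      if st.2.1.contains dish = false then
        let count := st.2.2 + 1
        let lastK := st.1 ++ [dish]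
        let seen := PySem.Set.add st.2.1 dish
        if (lastK.length : Int) > K then
          match PySem.List.pop? lastK 0 with
          | some (removed, lastK') =>
            match PySem.Set.remove? seen removed with
            | some seen' => (lastK', seen', count)
            | none => (lastK', seen, count)   -- unreachable: removed ∈ seen (no KeyError)
          | none => (lastK, seen, count)      -- unreachable: lastK nonempty after append
        else (lastK, seen, count)
      else st)
    (([] : List Int), (PySem.Set.empty : PySem.Set Int), (0 : Int))).2.2

-- ===== PORT B =====
def getMaximumEatenDishCount_3_alt (N : Int) (D : List Int) (K : Int) : Int :=
  (D.foldl
    (fun (st : PySem.Dict Int Int × Int) dish =>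
      match st.1.get? dish with
      | none => (st.1.insert dish (st.2 + 1), st.2 + 1)
      | some p => if K ≤ st.2 - p then (st.1.insert dish (st.2 + 1), st.2 + 1) else st)
    ((PySem.Dict.empty : PySem.Dict Int Int), (0 : Int))).2

-- ===== PRECONDITION & SPEC =====
def Spec_getMaximumEatenDishCount_3 (N : Int) (D : List Int) (K : Int) (out : Int) : Prop := out = getMaximumEatenDishCount_3_alt N D K
instance (N : Int) (D : List Int) (K : Int) (out : Int) : Decidable (Spec_getMaximumEatenDishCount_3 N D K out) := by unfold Spec_getMaximumEatenDishCount_3; infer_instance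

-- ===== CLAIM (what is proved, stated in full; the proofs are below) =====
def Claim_equal_getMaximumEatenDishCount_3 : Prop := ∀ (N : Int) (D : List Int) (K : Int), Dom_getMaximumEatenDishCount_3 N D K → Spec_getMaximumEatenDishCount_3 N D K (getMaximumEatenDishCount_3 N D K)

-- ===== LEMMAS AND PROOFS =====

-- the two loop bodies, named for the proofs (definitionally the lambdas in the ports)
def pvStepA (K : Int) (st : List Int × PySem.Set Int × Int) (dish : Int) :
    List Int × PySem.Set Int × Int :=
  if st.2.1.contains dish = false then
    let count := st.2.2 + 1
    let lastK := st.1 ++ [dish]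
    let seen := PySem.Set.add st.2.1 dish
    if (lastK.length : Int) > K then
      match PySem.List.pop? lastK 0 with
      | some (removed, lastK') =>
        match PySem.Set.remove? seen removed with
        | some seen' => (lastK', seen', count)
        | none => (lastK', seen, count)
      | none => (lastK, seen, count)
    else (lastK, seen, count)
  else st

def pvStepB (K : Int) (st : PySem.Dict Int Int × Int) (dish : Int) :
    PySem.Dict Int Int × Int :=
  match st.1.get? dish with
  | none => (st.1.insert dish (st.2 + 1), st.2 + 1)
  | some p => if K ≤ st.2 - p then (st.1.insert dish (st.2 + 1), st.2 + 1) else st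

theorem portA_eq (N : Int) (D : List Int) (K : Int) :
    getMaximumEatenDishCount_3 N D K
      = (D.foldl (pvStepA K) (([] : List Int), PySem.Set.empty, (0 : Int))).2.2 := rfl

theorem portB_eq (N : Int) (D : List Int) (K : Int) :
    getMaximumEatenDishCount_3_alt N D K
      = (D.foldl (pvStepB K) ((PySem.Dict.empty : PySem.Dict Int Int), (0 : Int))).2 := rfl

-- the coupling invariant between the two loop states
def pvInv (K : Int) (sa : List Int × PySem.Set Int × Int) (sb : PySem.Dict Int Int × Int) : Prop :=
  sb.2 = sa.2.2 ∧
  0 ≤ sa.2.2 ∧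
  (sa.1.length : Int) = min sa.2.2 (max K 0) ∧
  (∀ d : Int, sa.2.1.contains d = true ↔ d ∈ sa.1) ∧
  (∀ i : Nat, (h : i < sa.1.length) → sb.1.get? sa.1[i] = some (sa.2.2 - sa.1.length + i + 1)) ∧
  (∀ d p : Int, sb.1.get? d = some p → 1 ≤ p ∧ p ≤ sa.2.2 ∧ (sa.2.2 - p < K ↔ d ∈ sa.1))

theorem pvInv_init (K : Int) :
    pvInv K (([] : List Int), PySem.Set.empty, (0 : Int))
      ((PySem.Dict.empty : PySem.Dict Int Int), (0 : Int)) := by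
  refine ⟨rfl, le_refl _, by simp, ?_, ?_, ?_⟩
  · intro d; simp [PySem.Set.empty, PySem.Set.contains]
  · intro i h; simp at h
  · intro d p h; simp [pysem] at h


theorem pvInv_step' (K : Int) (win : List Int) (seen : PySem.Set Int) (c : Int)
    (last : PySem.Dict Int Int) (dish : Int)
    (h2 : 0 ≤ c) (h3 : (win.length : Int) = min c (max K 0))
    (h4 : ∀ d : Int, seen.contains d = true ↔ d ∈ win)
    (h5 : ∀ i : Nat, (h : i < win.length) → last.get? win[i] = some (c - win.length + i + 1))
    (h6 : ∀ d p : Int, last.get? d = some p → 1 ≤ p ∧ p ≤ c ∧ (c - p < K ↔ d ∈ win)) :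
    pvInv K (pvStepA K (win, seen, c) dish) (pvStepB K (last, c) dish) := by
  have h4' : ∀ d : Int, d ∈ seen ↔ d ∈ win := fun d =>
    (PySem.Set.contains_iff seen d).symm.trans (h4 d)
  by_cases hmem : dish ∈ win
  · -- dish already in the window: both sides skip
    have hct : seen.contains dish = true := (h4 dish).mpr hmem
    obtain ⟨i, hi, hdi⟩ := List.getElem_of_mem hmem
    have hgd : last.get? dish = some (c - win.length + i + 1) := by
      rw [← hdi]; exact h5 i hi
    obtain ⟨hq1, hq2, hqiff⟩ := h6 dish _ hgd
    have hlt : c - (c - (win.length : Int) + (i : Int) + 1) < K := hqiff.mpr hmem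
    have hA : pvStepA K (win, seen, c) dish = (win, seen, c) := by
      unfold pvStepA
      dsimp only
      rw [if_neg (fun hf => by rw [hct] at hf; simp at hf)]
    have hB : pvStepB K (last, c) dish = (last, c) := by
      unfold pvStepB
      dsimp only
      rw [hgd]
      dsimp only
      rw [if_neg (by omega)]
    rw [hA, hB]
    exact ⟨rfl, h2, h3, h4, h5, h6⟩
  · -- dish not in window: both sides eat
    have hct : seen.contains dish = false :=
      Bool.eq_false_iff.mpr (fun hh => hmem ((h4 dish).mp hh))
    have hB : pvStepB K (last, c) dish = (last.insert dish (c + 1), c + 1) := by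
      unfold pvStepB
      dsimp only
      cases hg : last.get? dish with
      | none => rfl
      | some p =>
        obtain ⟨hx1, hx2, hiff⟩ := h6 dish p hg
        have hnc : ¬ c - p < K := fun hc => hmem (hiff.mp hc)
        dsimp only
        rw [if_pos (by omega)]
    have hself : (last.insert dish (c + 1)).get? dish = some (c + 1) := by
      rw [PySem.Dict.get?_insert]
      rw [if_pos rfl]
    have hother : ∀ d : Int, d ≠ dish → (last.insert dish (c + 1)).get? d = last.get? d := by
      intro d hd
      rw [PySem.Dict.get?_insert]
      rw [if_neg hd]
    have hne_dish : ∀ x ∈ win, x ≠ dish := fun x hx he => hmem (he ▸ hx)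
    rw [hB]
    by_cases hpop : ((win ++ [dish]).length : Int) > K
    · -- the appended window overflows: the oldest entry is popped
      cases win with
      | nil =>
        -- here K ≤ 0: the freshly added dish is popped right away
        have hK0 : K ≤ 0 := by simp at hpop; omega
        have hA : pvStepA K (([] : List Int), seen, c) dish
            = (([] : List Int), PySem.Set.discard (PySem.Set.add seen dish) dish, c + 1) := by
          unfold pvStepA
          dsimp only
          rw [if_pos hct, if_pos hpop, List.nil_append, PySem.List.pop?_zero_cons]
          dsimp only
          rw [PySem.Set.remove?_of_mem ((PySem.Set.mem_add seen dish dish).mpr (Or.inr rfl))]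
        rw [hA]
        simp only [List.length_nil, Nat.cast_zero] at h3
        unfold pvInv
        dsimp only
        refine ⟨rfl, by omega, by simp; omega, ?_, ?_, ?_⟩
        · intro d
          rw [PySem.Set.contains_iff, PySem.Set.mem_discard, PySem.Set.mem_add, h4' d]
          simp
        · intro i hi; simp at hi
        · intro d p hg
          by_cases hd : d = dish
          · subst hd
            rw [hself] at hg
            have hp : p = c + 1 := (Option.some.inj hg).symm
            subst hp
            refine ⟨by omega, le_refl _, ?_⟩
            simp only [List.not_mem_nil, iff_false]
            omega
          · rw [hother d hd] at hg
            obtain ⟨hp1, hp2, hiff⟩ := h6 d p hg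
            simp only [List.not_mem_nil, iff_false] at hiff
            refine ⟨hp1, by omega, ?_⟩
            simp only [List.not_mem_nil, iff_false]
            omega
      | cons w ws =>
        have hlen : ((w :: ws).length : Int) = (ws.length : Int) + 1 := by simp
        have hKpos : 0 < K := by
          by_contra hk
          rw [not_lt] at hk
          rw [max_eq_right hk, min_eq_right h2] at h3
          omega
        have hmax : max K 0 = K := by omega
        rw [hmax] at h3
        have hLK : ((w :: ws).length : Int) = K := by
          simp only [List.length_append, List.length_cons, List.length_nil] at hpop
          omega
        have hKc : K ≤ c := by omega
        have hw_ne : w ≠ dish := hne_dish w List.mem_cons_self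
        have hwws : w ∉ ws := by
          intro hww
          obtain ⟨j, hj, hdj⟩ := List.getElem_of_mem hww
          have e1 := h5 0 (by simp)
          have e2 := h5 (j + 1) (by simp; omega)
          rw [List.getElem_cons_zero] at e1
          rw [List.getElem_cons_succ, hdj] at e2
          rw [e2] at e1
          have := Option.some.inj e1
          omega
        have hw_add : w ∈ PySem.Set.add seen dish :=
          (PySem.Set.mem_add seen dish w).mpr (Or.inl ((h4' w).mpr List.mem_cons_self))
        have hA : pvStepA K ((w :: ws), seen, c) dish
            = (ws ++ [dish], PySem.Set.discard (PySem.Set.add seen dish) w, c + 1) := by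
          unfold pvStepA
          dsimp only
          rw [if_pos hct, if_pos hpop, List.cons_append, PySem.List.pop?_zero_cons]
          dsimp only
          rw [PySem.Set.remove?_of_mem hw_add]
        rw [hA]
        unfold pvInv
        dsimp only
        refine ⟨rfl, by omega, ?_, ?_, ?_, ?_⟩
        · simp only [List.length_append, List.length_cons, List.length_nil]
          push_cast
          push_cast at hLK
          omega
        · intro d
          rw [PySem.Set.contains_iff, PySem.Set.mem_discard, PySem.Set.mem_add, h4' d,
            List.mem_append, List.mem_singleton, List.mem_cons]
          constructor
          · rintro ⟨(rfl | hws) | rfl, hnw⟩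
            · exact absurd rfl hnw
            · exact Or.inl hws
            · exact Or.inr rfl
          · rintro (hws | rfl)
            · exact ⟨Or.inl (Or.inr hws), fun he => hwws (he ▸ hws)⟩
            · exact ⟨Or.inr rfl, fun he => hw_ne he.symm⟩
        · intro i hi
          simp only [List.length_append, List.length_cons, List.length_nil] at hi ⊢
          by_cases hiw : i < ws.length
          · have hmemi : ws[i] ∈ (w :: ws) := List.mem_cons_of_mem w (List.getElem_mem hiw)
            have e := h5 (i + 1) (by simp; omega)
            rw [List.getElem_cons_succ] at e
            rw [List.getElem_append_left hiw, hother _ (hne_dish _ hmemi), e]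
            exact congrArg some (by push_cast; omega)
          · have hieq : i = ws.length := by omega
            subst hieq
            rw [List.getElem_concat_length, hself]
            · exact congrArg some (by push_cast; omega)
            · rfl
        · intro d p hg
          by_cases hd : d = dish
          · subst hd
            rw [hself] at hg
            have hp : p = c + 1 := (Option.some.inj hg).symm
            subst hp
            refine ⟨by omega, le_refl _, ?_⟩
            constructor
            · intro hc0
              exact List.mem_append_right _ (List.mem_singleton.mpr rfl)
            · intro hd0
              omega
          · rw [hother d hd] at hg
            obtain ⟨hp1, hp2, hiff⟩ := h6 d p hg
            refine ⟨hp1, by omega, ?_⟩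
            rw [List.mem_append, List.mem_singleton]
            constructor
            · intro hc
              have hdw : d ∈ (w :: ws) := hiff.mp (by omega)
              rcases List.mem_cons.mp hdw with rfl | hws
              · exfalso
                have e := h5 0 (by simp)
                rw [List.getElem_cons_zero, hg] at e
                have := Option.some.inj e
                push_cast at hLK
                omega
              · exact Or.inl hws
            · rintro (hws | rfl)
              · obtain ⟨j, hj, hdj⟩ := List.getElem_of_mem hws
                have e := h5 (j + 1) (by simp; omega)
                rw [List.getElem_cons_succ, hdj, hg] at e
                have := Option.some.inj e
                push_cast at hLK
                omega
              · exact absurd rfl hd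
    · -- window still fits after appending
      have hA : pvStepA K (win, seen, c) dish
          = (win ++ [dish], PySem.Set.add seen dish, c + 1) := by
        unfold pvStepA
        dsimp only
        rw [if_pos hct, if_neg hpop]
      rw [hA]
      have hKpos : 0 < K := by
        simp only [List.length_append, List.length_cons, List.length_nil] at hpop
        have hge : (0 : Int) ≤ (win.length : Int) := by positivity
        omega
      have hmax : max K 0 = K := by omega
      rw [hmax] at h3
      simp only [List.length_append, List.length_cons, List.length_nil] at hpop
      unfold pvInv
      dsimp only
      refine ⟨rfl, by omega, ?_, ?_, ?_, ?_⟩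
      · simp only [List.length_append, List.length_cons, List.length_nil]
        push_cast
        omega
      · intro d
        rw [PySem.Set.contains_iff, PySem.Set.mem_add, h4' d, List.mem_append,
          List.mem_singleton]
      · intro i hi
        simp only [List.length_append, List.length_cons, List.length_nil] at hi ⊢
        by_cases hiL : i < win.length
        · rw [List.getElem_append_left hiL,
            hother _ (hne_dish _ (List.getElem_mem hiL)), h5 i hiL]
          exact congrArg some (by push_cast; omega)
        · have hieq : i = win.length := by omega
          subst hieq
          rw [List.getElem_concat_length, hself]
          · exact congrArg some (by push_cast; omega)
          · rfl
      · intro d p hg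
        by_cases hd : d = dish
        · subst hd
          rw [hself] at hg
          have hp : p = c + 1 := (Option.some.inj hg).symm
          subst hp
          refine ⟨by omega, le_refl _, ?_⟩
          constructor
          · intro hc0
            exact List.mem_append_right _ (List.mem_singleton.mpr rfl)
          · intro hd0
            omega
        · rw [hother d hd] at hg
          obtain ⟨hp1, hp2, hiff⟩ := h6 d p hg
          refine ⟨hp1, by omega, ?_⟩
          rw [List.mem_append, List.mem_singleton]
          constructor
          · intro hc
            exact Or.inl (hiff.mp (by omega))
          · rintro (hdw | rfl)
            · obtain ⟨j, hj, hdj⟩ := List.getElem_of_mem hdw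
              have e := h5 j hj
              rw [hdj, hg] at e
              have := Option.some.inj e
              omega
            · exact absurd rfl hd

theorem pvInv_step (K : Int) (sa : List Int × PySem.Set Int × Int)
    (sb : PySem.Dict Int Int × Int) (dish : Int) (h : pvInv K sa sb) :
    pvInv K (pvStepA K sa dish) (pvStepB K sb dish) := by
  obtain ⟨win, seen, c⟩ := sa
  obtain ⟨last, cb⟩ := sb
  obtain ⟨h1, h2, h3, h4, h5, h6⟩ := h
  have hcb : cb = c := h1
  subst hcb
  exact pvInv_step' K win seen _ last dish h2 h3 h4 h5 h6

theorem pvInv_foldl (K : Int) (D : List Int) (sa : List Int × PySem.Set Int × Int)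
    (sb : PySem.Dict Int Int × Int) (h : pvInv K sa sb) :
    pvInv K (D.foldl (pvStepA K) sa) (D.foldl (pvStepB K) sb) := by
  induction D generalizing sa sb with
  | nil => exact h
  | cons d rest ih => exact ih _ _ (pvInv_step K sa sb d h)

-- ===== VERDICT (by name: the statement is the Claim_ definition above) =====
theorem getMaximumEatenDishCount_3_spec : Claim_equal_getMaximumEatenDishCount_3 := by
  intro N D K _
  unfold Spec_getMaximumEatenDishCount_3
  rw [portA_eq, portB_eq]
  exact ((pvInv_foldl K D _ _ (pvInv_init K)).1).symm
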